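-- pv_equiv track=rewrite | github.com/toddbiesiadecki/adventofcode2020 | day6.py | groupCount
-- ===== SOURCE A (Python) =====
-- def groupCount(group):
--     letterFound = {}
--     for i in range(0, 26):
--         letterFound[chr(ord('a')+i)] = False
--
--     members = group.split('\n')
--     for member in members:
--         for char in member:
--             letterFound[char]=True
--     numFound = 0
--     for letter, isFound in letterFound.items():
--         if(isFound):
--             numFound+=1
--     return numFound
-- ===== SOURCE B (Python) =====
-- def groupCount(group):
--     chars = sorted(c for c in group if c != '\n')
--     count = 0
--     prev = None
--     for c in chars:
--         if c != prev:
--             count += 1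
--         prev = c
--     return count
-- ===== Notes on version B (the rewrite author's own statement) =====
-- stated objective: alternative
-- what changed: Replaces A's 26-key boolean dictionary with its init/mark/count passes by a sort-then-scan: sort the non-newline characters and count runs (positions whose character differs from its predecessor), which equals the number of distinct characters.
import Mathlib
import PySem

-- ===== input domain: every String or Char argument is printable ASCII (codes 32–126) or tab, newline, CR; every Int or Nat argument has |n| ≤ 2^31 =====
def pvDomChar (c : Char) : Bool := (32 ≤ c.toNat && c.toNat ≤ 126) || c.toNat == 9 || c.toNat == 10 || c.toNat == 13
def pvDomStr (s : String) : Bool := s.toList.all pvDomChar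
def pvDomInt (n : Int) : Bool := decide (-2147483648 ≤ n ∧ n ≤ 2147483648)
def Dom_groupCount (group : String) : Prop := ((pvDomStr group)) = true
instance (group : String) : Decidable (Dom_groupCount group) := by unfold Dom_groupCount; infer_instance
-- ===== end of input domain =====

-- B replaces A's 26-key boolean dictionary (init/mark/count passes) by a sort-then-scan:
-- sort the non-newline characters and count runs; objective: alternative algorithm.


-- ===== PORT A =====
-- 'group.split('\n')' ported via PySem.Chars.splitOn (exact since the separator "\n" is non-empty);
-- the member loop then runs over List Char members, exactly the characters Python iterates.
def groupCount (group : String) : Int :=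
  let letterFound : PySem.Dict Char Bool :=
    (PySem.List.pyRange 0 26 1).foldl
      (fun d i => d.insert (Char.ofNat ('a'.toNat + i.toNat)) false) PySem.Dict.empty
  let members := PySem.Chars.splitOn group.toList ['\n']
  let letterFound := members.foldl
    (fun d member => member.foldl (fun d char => d.insert char true) d) letterFound
  letterFound.items.foldl (fun numFound p => if p.2 then numFound + 1 else numFound) 0

-- ===== PORT B =====
-- sorted(generator filtering '\n') = PySem.List.sorted of the filtered characters; the loop
-- carries (count, prev : Option Char), prev starting as None.
def groupCount_alt (group : String) : Int :=
  let chars := PySem.List.sorted (group.toList.filter (fun c => c != '\n')) (fun c => c) false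
  (chars.foldl
    (fun (st : Int × Option Char) c => ((if some c ≠ st.2 then st.1 + 1 else st.1), some c))
    (0, none)).1

-- ===== PRECONDITION & SPEC =====
def Spec_groupCount (group : String) (out : Int) : Prop := out = groupCount_alt group
instance (group : String) (out : Int) : Decidable (Spec_groupCount group out) := by unfold Spec_groupCount; infer_instance

-- ===== CLAIM (what is proved, stated in full; the proofs are below) =====
def Claim_equal_groupCount : Prop := ∀ (group : String), Dom_groupCount group → Spec_groupCount group (groupCount group)

-- ===== LEMMAS AND PROOFS =====

-- flattening the pieces of split('\n') gives the original characters minus the newlines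
theorem pvGo_flatten : ∀ (fuel : Nat) (l cur : List Char) (acc : List (List Char)),
    l.length < fuel →
    (PySem.Chars.splitOn.go ['\n'] fuel l cur acc).flatten
      = acc.reverse.flatten ++ cur.reverse ++ l.filter (fun c => c != '\n') := by
  intro fuel
  induction fuel with
  | zero => intro l cur acc h; omega
  | succ f ih =>
    intro l cur acc h
    cases l with
    | nil => simp [PySem.Chars.splitOn.go]
    | cons c rest =>
      by_cases hc : c = '\n'
      · subst hc
        simp only [PySem.Chars.splitOn.go, List.isPrefixOf, beq_self_eq_true, Bool.true_and,
          if_true, List.length_cons, List.drop_succ_cons,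
          List.length_nil, List.drop_zero, List.filter_cons]
        rw [ih rest [] (cur.reverse :: acc) (by simpa using Nat.lt_of_succ_lt_succ h)]
        simp
      · simp only [PySem.Chars.splitOn.go, List.isPrefixOf, List.filter_cons]
        rw [if_neg (by simp [Ne.symm hc]),
          ih rest (c :: cur) acc (by simpa using Nat.lt_of_succ_lt_succ h)]
        simp [hc]

theorem pvSplit_flatten (s : List Char) :
    (PySem.Chars.splitOn s ['\n']).flatten = s.filter (fun c => c != '\n') := by
  rw [PySem.Chars.splitOn, pvGo_flatten (s.length + 1) s [] [] (by omega)]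
  simp

-- the marking loop: a key reads true iff it was marked, else keeps its old value
theorem pvGetD_mark : ∀ (l : List Char) (d : PySem.Dict Char Bool) (k : Char),
    (l.foldl (fun d c => d.insert c true) d).getD k false
      = (if k ∈ l then true else d.getD k false) := by
  intro l
  induction l with
  | nil => intro d k; simp
  | cons c t ih =>
    intro d k
    rw [List.foldl_cons, ih]
    by_cases hk : k = c <;> by_cases ht : k ∈ t <;>
      simp [PySem.Dict.getD_insert, hk, ht]

-- the init loop stores only `false`, so every key still reads false
theorem pvFold_false : ∀ (l : List Int) (g : Int → Char) (d : PySem.Dict Char Bool) (k : Char),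
    d.getD k false = false →
    (l.foldl (fun d i => d.insert (g i) false) d).getD k false = false := by
  intro l
  induction l with
  | nil => intro g d k h; simpa using h
  | cons i t ih =>
    intro g d k h
    rw [List.foldl_cons]
    exact ih g _ k (by rw [PySem.Dict.getD_insert]; split <;> simp [h])

-- two duplicate-free lists with the same members have the same length
theorem pvLenEq (l1 l2 : List Char) (h1 : l1.Nodup) (h2 : l2.Nodup)
    (h : ∀ x, x ∈ l1 ↔ x ∈ l2) : l1.length = l2.length := by
  rw [← List.toFinset_card_of_nodup h1, ← List.toFinset_card_of_nodup h2]
  congr 1; ext x; simp [h x]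

-- counting the marked keys of the dict = the number of distinct marked characters
theorem pvCount (S L : List Char) (hS : S.Nodup) :
    (PySem.Set.update S L).countP (fun k => decide (k ∈ L))
      = (PySem.Set.ofList L).length := by
  rw [List.countP_eq_length_filter]
  refine pvLenEq _ _ ((PySem.Set.nodup_update S L hS).filter _) (PySem.Set.nodup_ofList L) ?_
  intro x
  simp only [List.mem_filter, PySem.Set.mem_update, PySem.Set.mem_ofList, decide_eq_true_eq]
  constructor
  · rintro ⟨-, hx⟩; exact hx
  · intro hx; exact ⟨Or.inr hx, hx⟩

-- inserting an element is inserting it after erasing it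
theorem pvInsertErase (c : Char) (s : Finset Char) : insert c (s.erase c) = insert c s := by
  ext x; by_cases hx : x = c <;> simp [hx]

-- B's run-counting loop on a ≤-sorted tail with predecessor a counts the distinct
-- characters of the tail other than a
theorem pvRunGo : ∀ (s : List Char) (a : Char) (cnt : Int),
    (a :: s).Pairwise (· ≤ ·) →
    (s.foldl
      (fun (st : Int × Option Char) c => ((if some c ≠ st.2 then st.1 + 1 else st.1), some c))
      (cnt, some a)).1 = cnt + ((s.toFinset.erase a).card : Int) := by
  intro s
  induction s with
  | nil => intro a cnt _; simp
  | cons c t ih =>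
    intro a cnt hp
    have hac : a ≤ c := (List.pairwise_cons.1 hp).1 c (by simp)
    have hct : (c :: t).Pairwise (· ≤ ·) := (List.pairwise_cons.1 hp).2
    by_cases hca : c = a
    · subst hca
      rw [List.foldl_cons, if_neg (show ¬(some c ≠ some c) by simp), ih c cnt hct]
      congr 2
      rw [List.toFinset_cons, Finset.erase_insert_eq_erase]
    · rw [List.foldl_cons, if_pos (show some c ≠ some a by simp [hca]), ih c (cnt + 1) hct]
      have hanotc : a ∉ (c :: t).toFinset := by
        intro hmem
        have hcy : c ≤ a := by
          rcases List.mem_cons.1 (List.mem_toFinset.1 hmem) with h | h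
          · exact le_of_eq h.symm
          · exact (List.pairwise_cons.1 hct).1 a h
        exact hca (le_antisymm hcy hac)
      have herase : (c :: t).toFinset.erase a = (c :: t).toFinset := by
        ext x
        simp only [Finset.mem_erase, and_iff_right_iff_imp]
        intro hx hxa
        exact hanotc (hxa ▸ hx)
      rw [herase]
      have hcard : (c :: t).toFinset.card = (t.toFinset.erase c).card + 1 := by
        rw [List.toFinset_cons, ← pvInsertErase c t.toFinset,
          Finset.card_insert_of_notMem (Finset.notMem_erase c _)]
      rw [hcard]
      push_cast
      ring

-- B's whole loop on a ≤-sorted list counts its distinct characters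
theorem pvRunCount (s : List Char) (hp : s.Pairwise (· ≤ ·)) :
    (s.foldl
      (fun (st : Int × Option Char) c => ((if some c ≠ st.2 then st.1 + 1 else st.1), some c))
      (0, none)).1 = (s.toFinset.card : Int) := by
  cases s with
  | nil => simp
  | cons c t =>
    rw [List.foldl_cons, if_pos (show some c ≠ (none : Option Char) by simp)]
    rw [pvRunGo t c (0 + 1) hp]
    have hcard : (c :: t).toFinset.card = (t.toFinset.erase c).card + 1 := by
      rw [List.toFinset_cons, ← pvInsertErase c t.toFinset,
        Finset.card_insert_of_notMem (Finset.notMem_erase c _)]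
    rw [hcard]
    push_cast
    ring

-- ===== VERDICT (by name: the statement is the Claim_ definition above) =====
set_option maxHeartbeats 1000000 in
theorem groupCount_spec : Claim_equal_groupCount := by
  intro group _
  unfold Spec_groupCount groupCount groupCount_alt
  simp only []
  set L := group.toList.filter (fun c => c != '\n') with hL
  set g : Int → Char := fun i => Char.ofNat ('a'.toNat + i.toNat) with hg
  set d0 : PySem.Dict Char Bool :=
    (PySem.List.pyRange 0 26 1).foldl (fun d i => d.insert (g i) false) PySem.Dict.empty with hd0
  -- A's side: the nested member loop is the flat loop over all non-newline characters
  rw [← List.foldl_flatten, pvSplit_flatten, ← hL]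
  have hnd0 : d0.keys.Nodup := by
    rw [hd0]
    exact PySem.Dict.nodup_keys_foldl_insert_key _ g _ _ (by simp)
  have hnd : (L.foldl (fun d c => d.insert c true) d0).keys.Nodup :=
    PySem.Dict.nodup_keys_foldl_insert L (fun _ _ => true) d0 hnd0
  rw [PySem.Dict.items_eq_map_keys _ hnd false,
    PySem.List.foldl_ite_add_one (fun p : Char × Bool => p.2 = true) _ 0, List.countP_map]
  have hkeys : (L.foldl (fun d c => d.insert c true) d0).keys = PySem.Set.update d0.keys L :=
    PySem.Dict.keys_foldl_insert L (fun _ _ => true) d0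
  have hcnt : (List.countP ((fun p : Char × Bool => decide (p.2 = true)) ∘
      fun k => (k, (L.foldl (fun d c => d.insert c true) d0).getD k false))
        (L.foldl (fun d c => d.insert c true) d0).keys)
      = (PySem.Set.ofList L).length := by
    rw [hkeys, ← pvCount d0.keys L hnd0]
    apply List.countP_congr
    intro k _
    simp only [Function.comp_apply, pvGetD_mark, decide_eq_true_eq]
    by_cases h : k ∈ L
    · simp [h]
    · rw [if_neg h, hd0, pvFold_false _ g _ k (by simp)]
      simp [h]
  rw [hcnt]
  -- B's side: the run count of the sorted list is the number of distinct characters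
  rw [pvRunCount (PySem.List.sorted L (fun c => c) false)
      (by simpa using PySem.List.sorted_pairwise L (fun c => c))]
  have hfin : (PySem.List.sorted L (fun c => c) false).toFinset = L.toFinset :=
    List.toFinset_eq_of_perm _ _ (PySem.List.sorted_perm L (fun c => c) false)
  rw [hfin]
  have hset : (PySem.Set.ofList L).toFinset = L.toFinset := by
    ext x; simp [PySem.Set.mem_ofList]
  rw [← List.toFinset_card_of_nodup (PySem.Set.nodup_ofList L), hset, zero_add]
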